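-- pv_equiv track=rewrite | github.com/lgarciasanchez5450/Pygame-ce-Spring-Jam-Submission | Utils/utils.py | walkOutWards
-- ===== SOURCE A (Python) =====
-- def walkOutWards(max:int):
--     '''Yield the Sequence: 0, 1, -1, 2, -2, 3, -3, 4, -4, n-1, -(n-1)'''
--     if max < 1:
--         return
--     yield 0
--     i = 1
--     while i < max:
--         yield i
--         yield -i
--         i += 1
-- ===== SOURCE B (Python) =====
-- def walkOutWards(max: int):
--     '''Yield the Sequence: 0, 1, -1, 2, -2, 3, -3, 4, -4, n-1, -(n-1)'''
--     for k in range(2 * max - 1):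
--         m = (k + 1) // 2
--         yield m if k % 2 else -m
-- ===== Notes on version B (the rewrite author's own statement) =====
-- stated objective: simpler
-- what changed: Replaced the guard plus paired-yields while loop by a single flat loop over one index range of the sequence's length, computing each term in closed form from the index (half of its successor, signed by parity), so the explicit guard and counter disappear.
import Mathlib
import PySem

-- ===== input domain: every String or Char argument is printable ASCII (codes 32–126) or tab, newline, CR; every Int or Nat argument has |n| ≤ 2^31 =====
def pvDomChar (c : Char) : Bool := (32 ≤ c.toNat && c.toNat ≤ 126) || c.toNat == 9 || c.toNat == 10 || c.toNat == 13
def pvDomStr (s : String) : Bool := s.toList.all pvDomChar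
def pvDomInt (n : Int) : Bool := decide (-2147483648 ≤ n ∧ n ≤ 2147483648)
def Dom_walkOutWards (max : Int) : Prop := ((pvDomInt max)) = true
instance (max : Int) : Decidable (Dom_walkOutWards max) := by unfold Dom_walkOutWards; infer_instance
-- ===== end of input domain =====

-- B replaces the guard plus paired-yields while loop by one flat loop over range(2*max-1)
-- with a closed-form term ((k+1)//2, signed by k's parity); same cost, simpler shape.

-- ===== PORT A =====
-- while i < max: yield i; yield -i; i += 1
def walkOutWardsLoop (max i : Int) : List Int :=
  if i < max then i :: -i :: walkOutWardsLoop max (i + 1) else []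
termination_by (max - i).toNat
decreasing_by omega

def walkOutWards (max : Int) : List Int :=
  if max < 1 then [] else 0 :: walkOutWardsLoop max 1

-- ===== PORT B =====
def walkOutWards_alt (max : Int) : List Int :=
  (PySem.List.pyRange 0 (2 * max - 1) 1).map (fun k =>
    let m := PySem.Int.floordiv (k + 1) 2
    if PySem.Int.mod k 2 ≠ 0 then m else -m)

-- ===== PRECONDITION & SPEC =====
def Spec_walkOutWards (max : Int) (out : List Int) : Prop := out = walkOutWards_alt max
instance (max : Int) (out : List Int) : Decidable (Spec_walkOutWards max out) := by unfold Spec_walkOutWards; infer_instance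

-- ===== CLAIM (what is proved, stated in full; the proofs are below) =====
def Claim_equal_walkOutWards : Prop := ∀ (max : Int), Dom_walkOutWards max → Spec_walkOutWards max (walkOutWards max)

-- ===== LEMMAS AND PROOFS =====

lemma loop_eq (max i : Int) : walkOutWardsLoop max i =
    (if i < max then i :: -i :: walkOutWardsLoop max (i + 1) else []) := by
  rw [walkOutWardsLoop]

-- appending one more pair to A's loop when the bound grows by one
lemma loop_succ : ∀ (k : Nat) (max i : Int), (max - i).toNat = k → i ≤ max →
    walkOutWardsLoop (max + 1) i = walkOutWardsLoop max i ++ [max, -max] := by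
  intro k
  induction k with
  | zero =>
    intro max i hk hle
    have hi : i = max := by omega
    subst hi
    rw [loop_eq i i, if_neg (lt_irrefl i)]
    rw [loop_eq (i + 1) i, if_pos (by omega : i < i + 1)]
    rw [loop_eq (i + 1) (i + 1), if_neg (lt_irrefl (i + 1))]
    simp
  | succ n ih =>
    intro max i hk hle
    have hlt : i < max := by omega
    have h1 : i < max + 1 := by omega
    rw [loop_eq max i, if_pos hlt]
    rw [loop_eq (max + 1) i, if_pos h1]
    rw [ih max (i + 1) (by omega) (by omega)]
    simp

lemma A_succ (max : Int) (h : 1 ≤ max) :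
    walkOutWards (max + 1) = walkOutWards max ++ [max, -max] := by
  unfold walkOutWards
  rw [if_neg (by omega), if_neg (by omega)]
  rw [loop_succ (max - 1).toNat max 1 (by omega) h]
  simp

lemma alt_term_odd (j : Int) :
    (if PySem.Int.mod (2 * j - 1) 2 ≠ 0 then PySem.Int.floordiv (2 * j - 1 + 1) 2
     else -(PySem.Int.floordiv (2 * j - 1 + 1) 2)) = j := by
  have hm : PySem.Int.mod (2 * j - 1) 2 = 1 := by
    rw [PySem.Int.mod_eq_emod_of_pos (by omega)]; omega
  have hd : PySem.Int.floordiv (2 * j - 1 + 1) 2 = j := by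
    rw [PySem.Int.floordiv_eq_ediv_of_pos (by omega)]; omega
  rw [hd, if_pos (by rw [hm]; omega)]

lemma alt_term_even (j : Int) :
    (if PySem.Int.mod (2 * j) 2 ≠ 0 then PySem.Int.floordiv (2 * j + 1) 2
     else -(PySem.Int.floordiv (2 * j + 1) 2)) = -j := by
  have hm : PySem.Int.mod (2 * j) 2 = 0 := by
    rw [PySem.Int.mod_eq_emod_of_pos (by omega)]; omega
  have hd : PySem.Int.floordiv (2 * j + 1) 2 = j := by
    rw [PySem.Int.floordiv_eq_ediv_of_pos (by omega)]; omega
  rw [hd, if_neg (by rw [hm]; omega)]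

lemma alt_succ (max : Int) (h : 1 ≤ max) :
    walkOutWards_alt (max + 1) = walkOutWards_alt max ++ [max, -max] := by
  unfold walkOutWards_alt
  have h2 : 2 * (max + 1) - 1 = (2 * max - 1) + 1 + 1 := by ring
  rw [h2, PySem.List.pyRange_one_succ_right (by omega),
      PySem.List.pyRange_one_succ_right (by omega)]
  simp only [List.map_append, List.map_cons, List.map_nil, List.append_assoc]
  congr 1
  simp only [List.cons_append, List.nil_append]
  rw [alt_term_odd max, show (2 * max - 1 + 1 : Int) = 2 * max from by ring, alt_term_even max]

lemma base_eq : walkOutWards 1 = walkOutWards_alt 1 := by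
  unfold walkOutWards walkOutWards_alt
  rw [if_neg (by omega)]
  rw [loop_eq 1 1, if_neg (by omega)]
  have h1 : (2 * (1 : Int) - 1) = 0 + 1 := by ring
  rw [h1, PySem.List.pyRange_one_succ_right (le_refl 0),
      PySem.List.pyRange_one_eq_nil (le_refl 0)]
  simp

lemma eq_of_pos : ∀ (max : Int), 1 ≤ max → walkOutWards max = walkOutWards_alt max := by
  intro max h
  induction max, h using Int.le_induction with
  | base => exact base_eq
  | succ n hn ih => rw [A_succ n hn, alt_succ n hn, ih]

-- ===== VERDICT (by name: the statement is the Claim_ definition above) =====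
theorem walkOutWards_spec : Claim_equal_walkOutWards := by
  intro max _
  unfold Spec_walkOutWards
  by_cases h : max < 1
  · unfold walkOutWards walkOutWards_alt
    rw [if_pos h, PySem.List.pyRange_one_eq_nil (by omega)]
    simp
  · exact eq_of_pos max (by omega)
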